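-- pv_equiv track=rewrite | github.com/Aniol24/AOC-23 | Day2/2_2.py | get_power
-- ===== SOURCE A (Python) =====
-- def parseString(line):
--     line = line.split(":")
--     played = line[1].split(";")
--     return played
--
-- def getBigger(move):
--     cubes = move.split(", ")
--     rgb = [0, 0, 0]
--
--     for cube in cubes:
--         cleaned_cube = cube.strip()
--         parts = cleaned_cube.split(" ")
--         if len(parts) == 2 and parts[0].isdigit():
--             number = int(parts[0])
--
--             if "red" in parts:
--                 if(rgb[0] < number):
--                     rgb[0] = number
--             elif "green" in parts:
--                 if(rgb[1] < number):
--                     rgb[1] = number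
--             elif "blue" in parts:
--                 if(rgb[2] < number):
--                     rgb[2] = number
--
--     return rgb
--
-- def get_power(line):
--     game = parseString(line)
--     final_array = [0, 0, 0]
--     for move in game:
--         new_array =  getBigger(move)
--         if new_array[0] > final_array[0]:
--             final_array[0] = new_array[0]
--         if new_array[1] > final_array[1]:
--             final_array[1] = new_array[1]
--         if new_array[2] > final_array[2]:
--             final_array[2] = new_array[2]
--
--     return final_array[0] * final_array[1] * final_array[2]
-- ===== SOURCE B (Python) =====
-- def get_power(line):
--     # Stage 1: tokenize the whole line once into (count, color) pairs.
--     moves = line.split(":")[1].split(";")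
--     parts = [cube.strip().split(" ") for move in moves for cube in move.split(", ")]
--     counts = [(int(p[0]), p[1]) for p in parts if len(p) == 2 and p[0].isdigit()]
--     # Stage 2: one independent max scan per color, multiplied together.
--     power = 1
--     for color in ("red", "green", "blue"):
--         power *= max((n for n, c in counts if c == color), default=0)
--     return power
-- ===== Notes on version B (the rewrite author's own statement) =====
-- stated objective: alternative
-- what changed: Replaces A's nested per-move maxima merged by three ifs with a staged pipeline: tokenize the whole line once into (count, color) pairs, then take one independent max-with-default scan per color and multiply the three maxima.
import Mathlib
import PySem

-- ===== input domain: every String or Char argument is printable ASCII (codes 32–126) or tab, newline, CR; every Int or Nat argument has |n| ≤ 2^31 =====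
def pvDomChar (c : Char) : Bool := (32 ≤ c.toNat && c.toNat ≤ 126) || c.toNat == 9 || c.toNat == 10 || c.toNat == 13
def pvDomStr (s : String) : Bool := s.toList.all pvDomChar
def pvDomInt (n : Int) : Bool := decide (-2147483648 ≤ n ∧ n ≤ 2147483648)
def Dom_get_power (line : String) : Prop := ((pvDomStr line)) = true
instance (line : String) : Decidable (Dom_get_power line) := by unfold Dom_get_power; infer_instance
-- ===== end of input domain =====

-- B restructures A (same cost): one tokenizing pass over the whole line into (count, color)
-- pairs, then an independent max-with-default scan per color, multiplied.

-- ===== PORT A =====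
-- parseString(line)
def pvParseString (line : String) : Option (List String) :=
  match PySem.List.pyGet? ((PySem.Str.split? line ":").getD []) 1 with
  | none => none  -- Python raises IndexError here (no ':' in line); excluded by Pre_
  | some seg => some ((PySem.Str.split? seg ";").getD [])

-- the body of getBigger's for-loop (one cube)
def pvCubeStep (rgb : Int × Int × Int) (cube : String) : Int × Int × Int :=
  match (PySem.Str.split? (PySem.Str.strip cube) " ").getD [] with
  | [p0, p1] =>  -- len(parts) == 2
    if PySem.Str.strIsdigit p0 then
      let number := (PySem.Int.ofStr? p0).getD 0  -- isdigit guarantees int(parts[0]) succeeds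
      if [p0, p1].contains "red" then
        (if rgb.1 < number then (number, rgb.2.1, rgb.2.2) else rgb)
      else if [p0, p1].contains "green" then
        (if rgb.2.1 < number then (rgb.1, number, rgb.2.2) else rgb)
      else if [p0, p1].contains "blue" then
        (if rgb.2.2 < number then (rgb.1, rgb.2.1, number) else rgb)
      else rgb
    else rgb
  | _ => rgb

def pvGetBigger (move : String) : Int × Int × Int :=
  ((PySem.Str.split? move ", ").getD []).foldl pvCubeStep (0, 0, 0)

-- the three ifs merging new_array into final_array
def pvMerge (f n : Int × Int × Int) : Int × Int × Int :=
  (if n.1 > f.1 then n.1 else f.1,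
   if n.2.1 > f.2.1 then n.2.1 else f.2.1,
   if n.2.2 > f.2.2 then n.2.2 else f.2.2)

def get_power (line : String) : Int :=
  match pvParseString line with
  | none => 0  -- unreachable under Pre_ (Python raises IndexError)
  | some game =>
    let f := game.foldl (fun f move => pvMerge f (pvGetBigger move)) (0, 0, 0)
    f.1 * f.2.1 * f.2.2

-- ===== PORT B =====
-- the comprehension filter+element: (int(p[0]), p[1]) for p with len(p)==2 and p[0].isdigit()
def pvToken? (p : List String) : Option (Int × String) :=
  match p with
  | [p0, p1] =>
    if PySem.Str.strIsdigit p0 then some ((PySem.Int.ofStr? p0).getD 0, p1) else none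
  | _ => none

def get_power_alt (line : String) : Int :=
  match PySem.List.pyGet? ((PySem.Str.split? line ":").getD []) 1 with
  | none => 0  -- unreachable under Pre_ (Python raises IndexError)
  | some seg =>
    let moves := (PySem.Str.split? seg ";").getD []
    let parts := moves.flatMap (fun move =>
      ((PySem.Str.split? move ", ").getD []).map
        (fun cube => (PySem.Str.split? (PySem.Str.strip cube) " ").getD []))
    let counts := parts.filterMap pvToken?
    (["red", "green", "blue"]).foldl
      (fun power color =>
        power * PySem.List.maxD ((counts.filter (fun nc => nc.2 == color)).map (·.1)) id 0) 1

-- ===== PRECONDITION & SPEC =====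
-- Pre_ excludes lines without ':', on which Python A (and B) raise IndexError.
def Pre_get_power (line : String) : Prop := PySem.Str.isIn ":" line = true
instance (line : String) : Decidable (Pre_get_power line) := by unfold Pre_get_power; infer_instance
def pvWitness_get_power : String := "Game 1: 3 blue, 4 red; 1 red, 2 green, 6 blue; 2 green"

def Spec_get_power (line : String) (out : Int) : Prop := out = get_power_alt line
instance (line : String) (out : Int) : Decidable (Spec_get_power line out) := by unfold Spec_get_power; infer_instance

-- ===== CLAIM (what is proved, stated in full; the proofs are below) =====
def Claim_equal_get_power : Prop := ∀ (line : String), Dom_get_power line → Pre_get_power line → Spec_get_power line (get_power line)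

-- ===== LEMMAS AND PROOFS =====
-- A's cube step, expressed on the already-split parts list
def pvStepP (rgb : Int × Int × Int) (p : List String) : Int × Int × Int :=
  match p with
  | [p0, p1] =>
    if PySem.Str.strIsdigit p0 then
      let number := (PySem.Int.ofStr? p0).getD 0
      if [p0, p1].contains "red" then
        (if rgb.1 < number then (number, rgb.2.1, rgb.2.2) else rgb)
      else if [p0, p1].contains "green" then
        (if rgb.2.1 < number then (rgb.1, number, rgb.2.2) else rgb)
      else if [p0, p1].contains "blue" then
        (if rgb.2.2 < number then (rgb.1, rgb.2.1, number) else rgb)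
      else rgb
    else rgb
  | _ => rgb

-- running max (the fold A's per-component updates compute)
def pvMfold (a : Int) (l : List Int) : Int :=
  l.foldl (fun m x => if m < x then x else m) a

-- the per-color count list B's filter+map builds
def pvColorList (ps : List (List String)) (c : String) : List Int :=
  ((ps.filterMap pvToken?).filter (fun nc => nc.2 == c)).map (·.1)

theorem pvCubeStep_eq_stepP (rgb : Int × Int × Int) (cube : String) :
    pvCubeStep rgb cube = pvStepP rgb ((PySem.Str.split? (PySem.Str.strip cube) " ").getD []) := by
  rfl

theorem digit_not_space (c : Char) (h : PySem.Chars.isdigit c = true) :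
    PySem.Int.isIntSpace c = false := by
  revert h
  unfold PySem.Chars.isdigit PySem.Int.isIntSpace
  simp only [Bool.and_eq_true, Bool.or_eq_false_iff, decide_eq_true_eq, decide_eq_false_iff_not,
    Char.le_def, Char.ext_iff, UInt32.le_iff_toNat_le, UInt32.toNat_inj.symm]
  have e0 : ('0').val.toNat = 48 := rfl
  have e9 : ('9').val.toNat = 57 := rfl
  have s1 : (' ').val.toNat = 32 := rfl
  have s2 : ('\t').val.toNat = 9 := rfl
  have s3 : ('\n').val.toNat = 10 := rfl
  have s4 : ('\x0d').val.toNat = 13 := rfl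
  have s5 : ('\x0b').val.toNat = 11 := rfl
  have s6 : ('\x0c').val.toNat = 12 := rfl
  rw [e0, e9, s1, s2, s3, s4, s5, s6]
  intro h
  omega

theorem digit_ne_sign (c : Char) (h : PySem.Chars.isdigit c = true) : c ≠ '-' ∧ c ≠ '+' := by
  revert h
  unfold PySem.Chars.isdigit
  simp only [Bool.and_eq_true, decide_eq_true_eq, ne_eq, Char.le_def, Char.ext_iff,
    UInt32.le_iff_toNat_le, UInt32.toNat_inj.symm]
  have e0 : ('0').val.toNat = 48 := rfl
  have e9 : ('9').val.toNat = 57 := rfl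
  have m1 : ('-').val.toNat = 45 := rfl
  have m2 : ('+').val.toNat = 43 := rfl
  rw [e0, e9, m1, m2]
  intro h
  omega

theorem pv_dropWhile_digits (l : List Char) (hall : ∀ c ∈ l, PySem.Chars.isdigit c = true) :
    List.dropWhile PySem.Int.isIntSpace l = l := by
  cases l with
  | nil => rfl
  | cons a t =>
    rw [List.dropWhile_cons_of_neg]
    simp [digit_not_space a (hall a (by simp))]

theorem pv_ofChars_digits_nonneg (cs : List Char) (h : PySem.Chars.strIsdigit cs = true) :
    0 ≤ (PySem.Int.ofChars? cs).getD 0 := by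
  unfold PySem.Chars.strIsdigit at h
  rw [Bool.and_eq_true] at h
  obtain ⟨hne, hall⟩ := h
  rw [List.all_eq_true] at hall
  unfold PySem.Int.ofChars?
  rw [pv_dropWhile_digits cs hall]
  have hallr : ∀ c ∈ cs.reverse, PySem.Chars.isdigit c = true := by
    intro c hc; exact hall c (List.mem_reverse.mp hc)
  rw [pv_dropWhile_digits cs.reverse hallr, List.reverse_reverse]
  cases cs with
  | nil => simp at hne
  | cons a t =>
    have hd := digit_ne_sign a (hall a (by simp))
    dsimp only
    split
    next ds heq =>
      rw [List.cons.injEq] at heq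
      exact absurd heq.1 hd.1
    next ds heq =>
      rw [List.cons.injEq] at heq
      exact absurd heq.1 hd.2
    next =>
      exact (fun (o : Option Nat) =>
        by cases o <;> simp : ∀ o : Option Nat,
          0 ≤ (Option.map (fun (n:Int) => n) (do let a ← o; pure ((a:Int)))).getD 0) _

-- int(s) of an isdigit() string is never negative
theorem pv_ofStr_digits_nonneg (s : String) (h : PySem.Str.strIsdigit s = true) :
    0 ≤ (PySem.Int.ofStr? s).getD 0 := by
  rw [PySem.Str.strIsdigit_eq] at h
  exact pv_ofChars_digits_nonneg s.toList h

-- A's flat fold over the parts lists computes, per component, the running max of the color's counts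
theorem pv_colorList_cons_none (p : List String) (ps : List (List String)) (c : String)
    (h : pvToken? p = none) : pvColorList (p :: ps) c = pvColorList ps c := by
  unfold pvColorList
  rw [List.filterMap_cons_none h]

theorem pv_colorList_cons_some (p : List String) (ps : List (List String)) (c cl : String)
    (n : Int) (h : pvToken? p = some (n, cl)) :
    pvColorList (p :: ps) c = if cl == c then n :: pvColorList ps c else pvColorList ps c := by
  unfold pvColorList
  rw [List.filterMap_cons_some h, List.filter_cons]
  split
  next hcc => simp_all
  next hcc => simp_all

theorem pv_digit_ne2 {p0 c : String} (h : PySem.Str.strIsdigit p0 = true)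
    (hc : PySem.Str.strIsdigit c = false) : (c == p0) = false := by
  by_cases he : c = p0
  · subst he; rw [hc] at h; exact absurd h (by simp)
  · simpa using he

theorem pvMfold_cons (a x : Int) (l : List Int) :
    pvMfold a (x :: l) = pvMfold (if a < x then x else a) l := rfl

theorem pv_fold_stepP (ps : List (List String)) (f : Int × Int × Int) :
    ps.foldl pvStepP f =
      (pvMfold f.1 (pvColorList ps "red"), pvMfold f.2.1 (pvColorList ps "green"),
       pvMfold f.2.2 (pvColorList ps "blue")) := by
  induction ps generalizing f with
  | nil =>
    obtain ⟨f1, f2, f3⟩ := f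
    rfl
  | cons p ps ih =>
    rw [List.foldl_cons]
    match hp : p with
    | [p0, p1] =>
      by_cases hd : PySem.Str.strIsdigit p0 = true
      · have htok : pvToken? [p0, p1] = some ((PySem.Int.ofStr? p0).getD 0, p1) := by
          unfold pvToken?; dsimp only; rw [if_pos hd]
        have hnr : ("red" == p0) = false := pv_digit_ne2 hd (by decide)
        have hng : ("green" == p0) = false := pv_digit_ne2 hd (by decide)
        have hnb : ("blue" == p0) = false := pv_digit_ne2 hd (by decide)
        set n := (PySem.Int.ofStr? p0).getD 0 with hn
        rw [pv_colorList_cons_some _ _ _ _ _ htok, pv_colorList_cons_some _ _ _ _ _ htok,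
            pv_colorList_cons_some _ _ _ _ _ htok]
        have hstep : pvStepP f [p0, p1] =
            (if "red" == p1 then (if f.1 < n then (n, f.2.1, f.2.2) else f)
             else if "green" == p1 then (if f.2.1 < n then (f.1, n, f.2.2) else f)
             else if "blue" == p1 then (if f.2.2 < n then (f.1, f.2.1, n) else f)
             else f) := by
          unfold pvStepP
          dsimp only
          rw [if_pos hd]
          simp only [List.contains_cons, List.contains_nil, Bool.or_false, hnr, hng, hnb,
            Bool.false_or]
          rfl
        rw [hstep]
        by_cases h1 : p1 = "red"
        · subst h1
          simp only [beq_self_eq_true, Bool.false_eq_true, if_false, if_true,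
            (by decide : ("red" == "green") = false), (by decide : ("red" == "blue") = false)]
          rw [ih, pvMfold_cons]
          split <;> rfl
        · by_cases h2 : p1 = "green"
          · subst h2
            simp only [beq_self_eq_true, Bool.false_eq_true, if_false, if_true,
              (by decide : ("red" == "green") = false), (by decide : ("green" == "red") = false),
              (by decide : ("green" == "blue") = false)]
            rw [ih, pvMfold_cons]
            split <;> rfl
          · by_cases h3 : p1 = "blue"
            · subst h3
              simp only [beq_self_eq_true, Bool.false_eq_true, if_false, if_true,
                (by decide : ("red" == "blue") = false), (by decide : ("green" == "blue") = false),
                (by decide : ("blue" == "red") = false), (by decide : ("blue" == "green") = false)]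
              rw [ih, pvMfold_cons]
              split <;> rfl
            · have e1 : ("red" == p1) = false := by simpa using fun h => h1 h.symm
              have e2 : ("green" == p1) = false := by simpa using fun h => h2 h.symm
              have e3 : ("blue" == p1) = false := by simpa using fun h => h3 h.symm
              have e1b : (p1 == "red") = false := by simpa using h1
              have e2b : (p1 == "green") = false := by simpa using h2
              have e3b : (p1 == "blue") = false := by simpa using h3
              simp only [e1, e2, e3, e1b, e2b, e3b, Bool.false_eq_true, if_false]
              exact ih f
      · have htok : pvToken? [p0, p1] = none := by
          unfold pvToken?; dsimp only; rw [if_neg hd]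
        have hstep : pvStepP f [p0, p1] = f := by
          unfold pvStepP; dsimp only; rw [if_neg hd]
        rw [hstep, pv_colorList_cons_none _ _ _ htok, pv_colorList_cons_none _ _ _ htok,
            pv_colorList_cons_none _ _ _ htok]
        exact ih f
    | [] =>
      rw [(rfl : pvStepP f [] = f), pv_colorList_cons_none _ _ _ rfl,
          pv_colorList_cons_none _ _ _ rfl, pv_colorList_cons_none _ _ _ rfl]
      exact ih f
    | [p0] =>
      rw [(rfl : pvStepP f [p0] = f), pv_colorList_cons_none _ _ _ rfl,
          pv_colorList_cons_none _ _ _ rfl, pv_colorList_cons_none _ _ _ rfl]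
      exact ih f
    | p0 :: p1 :: p2 :: t =>
      rw [(rfl : pvStepP f (p0 :: p1 :: p2 :: t) = f), pv_colorList_cons_none _ _ _ rfl,
          pv_colorList_cons_none _ _ _ rfl, pv_colorList_cons_none _ _ _ rfl]
      exact ih f

-- max(l, default=0) of a list of nonnegative ints is the running max from 0
theorem pv_fold_opt (f : Option Int → Int → Option Int)
    (hf : ∀ m x, f (some m) x = if m < x then some x else some m)
    (l : List Int) (a : Int) : l.foldl f (some a) = some (pvMfold a l) := by
  induction l generalizing a with
  | nil => rfl
  | cons x xs ih =>
    rw [List.foldl_cons, hf]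
    split
    next h =>
      rw [ih]
      unfold pvMfold
      rw [List.foldl_cons, if_pos h]
    next h =>
      rw [ih]
      unfold pvMfold
      rw [List.foldl_cons, if_neg h]

theorem pv_maxD_eq_mfold (l : List Int) (h : ∀ x ∈ l, 0 ≤ x) :
    PySem.List.maxD l id 0 = pvMfold 0 l := by
  cases l with
  | nil => rfl
  | cons x xs =>
    unfold PySem.List.maxD PySem.List.max?
    simp only [id_eq, List.foldl_cons]
    rw [pv_fold_opt _ (fun m y => rfl)]
    have hx : (0:Int) ≤ x := h x (by simp)
    have h2 : pvMfold 0 (x :: xs) = pvMfold x xs := by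
      unfold pvMfold
      rw [List.foldl_cons]
      congr 1
      split <;> omega
    rw [h2]
    rfl

theorem pv_colorList_nonneg (ps : List (List String)) (c : String) :
    ∀ x ∈ pvColorList ps c, 0 ≤ x := by
  intro x hx
  unfold pvColorList at hx
  rw [List.mem_map] at hx
  obtain ⟨nc, hnc, hfst⟩ := hx
  rw [List.mem_filter] at hnc
  obtain ⟨hnc, -⟩ := hnc
  rw [List.mem_filterMap] at hnc
  obtain ⟨p, -, hp⟩ := hnc
  unfold pvToken? at hp
  subst hfst
  split at hp
  · split at hp
    next hd =>
      rw [Option.some.injEq] at hp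
      rw [← hp]
      exact pv_ofStr_digits_nonneg _ hd
    next => exact absurd hp (by simp)
  · exact absurd hp (by simp)

-- A's outer loop (merge of per-move maxima) equals one flat fold over all cubes
theorem pv_merge_cubeStep (f g : Int × Int × Int) (cube : String) :
    pvMerge f (pvCubeStep g cube) = pvCubeStep (pvMerge f g) cube := by
  unfold pvCubeStep pvMerge
  rcases (PySem.Str.split? (PySem.Str.strip cube) " ").getD [] with _ | ⟨p0, _ | ⟨p1, _ | ⟨p2, t⟩⟩⟩
  case nil => rfl
  case cons.nil => rfl
  case cons.cons.cons => rfl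
  case cons.cons.nil =>
    obtain ⟨f1, f2, f3⟩ := f
    obtain ⟨g1, g2, g3⟩ := g
    simp only []
    split_ifs <;> simp_all <;> omega

theorem pv_merge_fold (cubes : List String) (f g : Int × Int × Int) :
    pvMerge f (cubes.foldl pvCubeStep g) = cubes.foldl pvCubeStep (pvMerge f g) := by
  induction cubes generalizing g with
  | nil => rfl
  | cons c cs ih => simp only [List.foldl_cons, ih, pv_merge_cubeStep]

theorem pv_merge_zero (f : Int × Int × Int) (h : 0 ≤ f.1 ∧ 0 ≤ f.2.1 ∧ 0 ≤ f.2.2) :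
    pvMerge f (0, 0, 0) = f := by
  obtain ⟨f1, f2, f3⟩ := f
  obtain ⟨h1, h2, h3⟩ := h
  simp only [] at h1 h2 h3
  have e1 : ¬((0 : Int) > f1) := by omega
  have e2 : ¬((0 : Int) > f2) := by omega
  have e3 : ¬((0 : Int) > f3) := by omega
  simp [pvMerge, e1, e2, e3]

theorem pv_merge_nonneg (f n : Int × Int × Int) (h : 0 ≤ f.1 ∧ 0 ≤ f.2.1 ∧ 0 ≤ f.2.2) :
    0 ≤ (pvMerge f n).1 ∧ 0 ≤ (pvMerge f n).2.1 ∧ 0 ≤ (pvMerge f n).2.2 := by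
  simp only [pvMerge]; split_ifs <;> simp_all <;> omega

theorem pv_outer_flat_aux (moves : List String) (f : Int × Int × Int)
    (h : 0 ≤ f.1 ∧ 0 ≤ f.2.1 ∧ 0 ≤ f.2.2) :
    moves.foldl (fun f move => pvMerge f (pvGetBigger move)) f =
      (moves.flatMap (fun move => (PySem.Str.split? move ", ").getD [])).foldl pvCubeStep f := by
  induction moves generalizing f with
  | nil => simp only [List.flatMap_nil, List.foldl_nil]
  | cons m ms ih =>
    simp only [List.foldl_cons, List.flatMap_cons, List.foldl_append]
    have hstep : pvMerge f (pvGetBigger m)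
        = ((PySem.Str.split? m ", ").getD []).foldl pvCubeStep f := by
      unfold pvGetBigger
      rw [pv_merge_fold, pv_merge_zero f h]
    have hn := pv_merge_nonneg f (pvGetBigger m) h
    rw [hstep] at hn
    rw [hstep, ih _ hn]

theorem pv_outer_flat (moves : List String) :
    moves.foldl (fun f move => pvMerge f (pvGetBigger move)) (0, 0, 0) =
      (moves.flatMap (fun move => (PySem.Str.split? move ", ").getD [])).foldl
        pvCubeStep (0, 0, 0) := by
  exact pv_outer_flat_aux moves (0, 0, 0) (by norm_num)

-- ===== VERDICT (by name: the statement is the Claim_ definition above) =====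
theorem get_power_spec : Claim_equal_get_power := by
  intro line _ _
  unfold Spec_get_power get_power get_power_alt pvParseString
  cases h : PySem.List.pyGet? ((PySem.Str.split? line ":").getD []) 1 with
  | none => rfl
  | some seg =>
    simp only []
    rw [pv_outer_flat,
      show pvCubeStep = (fun rgb cube =>
          pvStepP rgb ((PySem.Str.split? (PySem.Str.strip cube) " ").getD [])) from
        funext fun _ => funext fun _ => pvCubeStep_eq_stepP _ _,
      ← List.foldl_map, List.map_flatMap, pv_fold_stepP]
    simp only [List.foldl_cons, List.foldl_nil, one_mul]
    simp only [show ∀ c, (((((PySem.Str.split? seg ";").getD []).flatMap fun move =>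
          ((PySem.Str.split? move ", ").getD []).map fun cube =>
            (PySem.Str.split? (PySem.Str.strip cube) " ").getD []).filterMap pvToken?).filter
              (fun nc => nc.2 == c)).map (·.1) = pvColorList
        ((((PySem.Str.split? seg ";").getD []).flatMap fun move =>
          ((PySem.Str.split? move ", ").getD []).map fun cube =>
            (PySem.Str.split? (PySem.Str.strip cube) " ").getD [])) c from fun c => rfl]
    rw [pv_maxD_eq_mfold _ (pv_colorList_nonneg _ "red"),
        pv_maxD_eq_mfold _ (pv_colorList_nonneg _ "green"),
        pv_maxD_eq_mfold _ (pv_colorList_nonneg _ "blue")]
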